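-- pv_equiv track=rewrite | github.com/oedo3/101L_005L | assig_9.py/code/code.py | reported_month_dict
-- ===== SOURCE A (Python) =====
-- def reported_month_dict(data):
--     dict_ex = {}
--     for i in data[1:]:
--         temp = i[1][0:2]
--         if temp in dict_ex:
--             dict_ex[temp]+=1
--         else:
--             dict_ex[temp]=1
--     return dict_ex
-- ===== SOURCE B (Python) =====
-- def reported_month_dict(data):
--     def go(prefixes):
--         if not prefixes:
--             return {}
--         k = prefixes[0]
--         rest = [p for p in prefixes if p != k]
--         d = {k: len(prefixes) - len(rest)}
--         d.update(go(rest))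
--         return d
--     return go([row[1][:2] for row in data[1:]])
-- ===== Notes on version B (the rewrite author's own statement) =====
-- stated objective: alternative
-- what changed: Replaces the single-pass dict accumulation (membership test + increment per row) with a recursive partition: take the first prefix, obtain its count as the length drop after filtering out all its occurrences, and recurse on the remaining prefixes.
import Mathlib
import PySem

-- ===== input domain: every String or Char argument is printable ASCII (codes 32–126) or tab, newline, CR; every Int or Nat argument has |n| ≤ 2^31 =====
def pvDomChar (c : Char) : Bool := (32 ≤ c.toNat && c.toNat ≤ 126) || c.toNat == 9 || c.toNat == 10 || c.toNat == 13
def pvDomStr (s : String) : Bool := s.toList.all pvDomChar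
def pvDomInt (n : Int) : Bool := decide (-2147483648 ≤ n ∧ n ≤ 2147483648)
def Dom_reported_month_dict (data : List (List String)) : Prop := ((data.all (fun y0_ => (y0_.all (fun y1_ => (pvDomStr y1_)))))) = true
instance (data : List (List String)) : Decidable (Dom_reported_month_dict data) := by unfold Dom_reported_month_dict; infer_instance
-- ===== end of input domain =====

-- B counts prefixes by recursive partition (count of the first prefix = length drop after filtering
-- out its occurrences, then recurse on the rest) instead of A's single-pass incremental dict
-- accumulation; same return value (alternative decomposition, no speed claim).
-- ===== PORT A =====
def reported_month_dict (data : List (List String)) : List (String × Int) :=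
  ((PySem.List.slice data (some 1) none).foldl (fun dict_ex i =>
      let temp := PySem.Str.slice ((PySem.List.pyGet? i 1).getD "") (some 0) (some 2)
      if dict_ex.contains temp then
        dict_ex.insert temp (dict_ex.getD temp 0 + 1)
      else
        dict_ex.insert temp 1)
    PySem.Dict.empty).items

-- ===== PORT B =====
-- go: d = {k: len(prefixes)-len(rest)}; d.update(go(rest)). Every key of go(rest) differs from k
-- (rest was filtered on ≠ k), so the updated dict is exactly the k-entry consed onto go(rest).
def rmdGo : List String → List (String × Int)
  | [] => []
  | k :: t =>
    let rest := (k :: t).filter (fun p => p ≠ k)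
    (k, ((k :: t).length : Int) - rest.length) :: rmdGo rest
termination_by l => l.length
decreasing_by
  have := List.length_filter_le (fun p => !decide (p = k)) t
  simp only [List.filter_cons, decide_not]
  simp only [decide_true, Bool.not_true, Bool.false_eq_true, if_false, List.length_cons]
  omega

def reported_month_dict_alt (data : List (List String)) : List (String × Int) :=
  rmdGo ((PySem.List.slice data (some 1) none).map
    (fun row => PySem.Str.slice ((PySem.List.pyGet? row 1).getD "") (some 0) (some 2)))

-- ===== PRECONDITION & SPEC =====
-- Pre_ excludes inputs where Python raises: any row after the first with fewer than 2 fields makes row[1] an IndexError in both A and B.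
def Pre_reported_month_dict (data : List (List String)) : Prop :=
  ∀ row ∈ data.drop 1, 2 ≤ row.length
instance (data : List (List String)) : Decidable (Pre_reported_month_dict data) := by
  unfold Pre_reported_month_dict; infer_instance
def pvWitness_reported_month_dict : List (List String) :=
  [["hdr"], ["a", "03-01"], ["b", "03-07"], ["c", "11-02"]]
def Spec_reported_month_dict (data : List (List String)) (out : List (String × Int)) : Prop := out = reported_month_dict_alt data
instance (data : List (List String)) (out : List (String × Int)) : Decidable (Spec_reported_month_dict data out) := by unfold Spec_reported_month_dict; infer_instance

-- ===== CLAIM =====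
def Claim_equal_reported_month_dict : Prop := ∀ (data : List (List String)), Dom_reported_month_dict data → Pre_reported_month_dict data → Spec_reported_month_dict data (reported_month_dict data)

-- ===== LEMMAS AND PROOFS =====

-- A's branch on membership is the unconditional counter step.
theorem step_eq_counter_step (d : PySem.Dict String Int) (x : String) :
    (if d.contains x then d.insert x (d.getD x 0 + 1) else d.insert x 1) =
      d.insert x (d.getD x 0 + 1) := by
  by_cases h : d.contains x = true
  · simp [h]
  · simp only [Bool.not_eq_true] at h
    simp [h, PySem.Dict.getD_of_not_contains d 0 h]

-- Folding Set.add over a list skips the copies of an element already present.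
theorem foldl_add_mem (k : String) (t : List String) (s : PySem.Set String) (hk : k ∈ s) :
    t.foldl PySem.Set.add s = (t.filter (fun p => p ≠ k)).foldl PySem.Set.add s := by
  induction t generalizing s with
  | nil => rfl
  | cons a t ih =>
    by_cases h : a = k
    · subst h
      have : PySem.Set.add s a = s := by
        simp [PySem.Set.add, PySem.Set.contains, hk]
      simp [this, ih s hk]
    · simp only [List.filter_cons, ne_eq, h, not_false_iff, decide_true, List.foldl_cons]
      exact ih _ (by simp [PySem.Set.add]; split <;> simp [hk])

-- A head element distinct from everything folded later stays in front.
theorem foldl_add_cons (k : String) (t : List String) (s : PySem.Set String)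
    (h : ∀ x ∈ t, x ≠ k) :
    t.foldl PySem.Set.add (k :: s) = k :: t.foldl PySem.Set.add s := by
  induction t generalizing s with
  | nil => rfl
  | cons a t ih =>
    have ha : a ≠ k := h a (by simp)
    have : PySem.Set.add (k :: s) a = k :: PySem.Set.add s a := by
      simp [PySem.Set.add, PySem.Set.contains, ha]
      split <;> rfl
    simp only [List.foldl_cons, this]
    exact ih _ (fun x hx => h x (by simp [hx]))

-- First-occurrence dedup unrolls as: head, then dedup of the tail with the head's copies removed.
theorem ofList_cons_filter (k : String) (t : List String) :
    PySem.Set.ofList (k :: t) = k :: PySem.Set.ofList (t.filter (fun p => p ≠ k)) := by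
  have h1 : PySem.Set.ofList (k :: t) = t.foldl PySem.Set.add [k] := by
    simp [PySem.Set.ofList_eq_foldl, PySem.Set.add, PySem.Set.contains]
  rw [h1, foldl_add_mem k t [k] (by simp)]
  rw [show ([k] : PySem.Set String) = k :: [] from rfl]
  rw [foldl_add_cons k _ [] (fun x hx => by simp [List.mem_filter] at hx; exact hx.2)]
  simp [PySem.Set.ofList_eq_foldl]

theorem count_add_filter_length (k : String) (t : List String) :
    t.count k + (t.filter (fun p => p ≠ k)).length = t.length := by
  simp only [ne_eq, decide_not]
  induction t with
  | nil => simp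
  | cons a t ih =>
    by_cases h : a = k <;> simp [h] <;> omega

theorem count_filter_ne (x k : String) (t : List String) (h : x ≠ k) :
    (t.filter (fun p => p ≠ k)).count x = t.count x := by
  simp only [ne_eq, decide_not]
  induction t with
  | nil => simp
  | cons a t ih =>
    by_cases h2 : a = k
    · simp [h2, Ne.symm h, ih]
    · simp [h2, List.count_cons, ih]

-- B's recursive partition computes exactly Counter(l).items(): distinct keys in first-occurrence
-- order, each paired with its multiplicity.
theorem rmdGo_eq_counter_items (l : List String) :
    rmdGo l = (PySem.Set.ofList l).map (fun k => (k, (l.count k : Int))) := by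
  induction l using rmdGo.induct with
  | case1 => simp [rmdGo, PySem.Set.ofList]
  | case2 k t rest ih =>
    have hrest : rest = t.filter (fun p => p ≠ k) := by
      simp only [rest, List.filter_cons, ne_eq, decide_not, decide_true, Bool.not_true,
        Bool.false_eq_true, if_false]
    rw [rmdGo, ofList_cons_filter, List.map_cons, ih, ← hrest]
    congr 1
    · have hc := count_add_filter_length k t
      simp only [ne_eq, decide_not] at hc
      simp only [List.filter_cons, ne_eq, decide_not, decide_true, Bool.not_true,
        Bool.false_eq_true, if_false, List.length_cons, List.count_cons, BEq.rfl, if_true,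
        Prod.mk.injEq, true_and]
      omega
    · rw [hrest]
      apply List.map_congr_left
      intro x hx
      have hxk : x ≠ k := by
        have hm := (PySem.Set.mem_ofList (xs := t.filter (fun p => p ≠ k)) (y := x)).mp hx
        simp [List.mem_filter] at hm
        exact hm.2
      have hcf := count_filter_ne x k t hxk
      simp only [ne_eq, decide_not] at hcf
      simp [hcf, Ne.symm hxk]

-- ===== VERDICT =====
theorem reported_month_dict_spec : Claim_equal_reported_month_dict := by
  intro data _ _
  unfold Spec_reported_month_dict reported_month_dict reported_month_dict_alt
  simp only [step_eq_counter_step]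
  rw [← List.foldl_map (f := fun row => PySem.Str.slice ((PySem.List.pyGet? row 1).getD "") (some 0) (some 2))
        (g := fun (d : PySem.Dict String Int) x => d.insert x (d.getD x 0 + 1))]
  simp only [PySem.Dict.foldl_insert_getD_add_one_eq_counter,
    PySem.Dict.items_counter, rmdGo_eq_counter_items]
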